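-- pv_equiv track=rewrite | github.com/parakh-tayal/LogicMojo-DSA-Jan26-parakh-tayal | Create_Longest_Palindrome.py | create_longest_palindrome_length
-- ===== SOURCE A (Python) =====
-- def create_longest_palindrome_length(n):
--     """
--     :type s: str
--     :rtype: bool
--     """
--     hash = {}
--     for i in n:
--         hash[i] = hash.get(i,0)+1
--
--     length=0
--     for i in hash.values():
--         length+= (i//2) * 2
--
--     if length < len(n):
--         length+=1
--
--     return length
-- ===== SOURCE B (Python) =====
-- def create_longest_palindrome_length(n):
--     s = sorted(n)
--     length = 0
--     i = 0
--     while i + 1 < len(s):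
--         if s[i] == s[i + 1]:
--             length += 2
--             i += 2
--         else:
--             i += 1
--     if length < len(n):
--         length += 1
--     return length
-- ===== Notes on version B (the rewrite author's own statement) =====
-- stated objective: alternative
-- what changed: Replaces A's hash-map frequency counting plus a second loop over the counts with a sort-then-scan algorithm: sort the characters and greedily pair adjacent equal ones in one linear walk, never building any frequency table.
import Mathlib
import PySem

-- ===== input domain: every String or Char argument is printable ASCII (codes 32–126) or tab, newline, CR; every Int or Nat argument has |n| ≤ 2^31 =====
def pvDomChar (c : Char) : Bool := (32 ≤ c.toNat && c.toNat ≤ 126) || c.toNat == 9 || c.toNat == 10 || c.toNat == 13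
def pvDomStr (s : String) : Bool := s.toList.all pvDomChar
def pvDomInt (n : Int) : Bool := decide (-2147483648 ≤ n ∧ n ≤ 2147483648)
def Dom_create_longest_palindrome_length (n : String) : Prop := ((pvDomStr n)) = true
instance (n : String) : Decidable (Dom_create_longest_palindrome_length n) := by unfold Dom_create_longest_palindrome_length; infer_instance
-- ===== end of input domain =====

-- B replaces A's hash-map frequency counting (build a dict of counts, then sum even halves of the
-- counts) by sort-then-scan: sort the characters and greedily pair adjacent equal ones in one walk
-- (objective: alternative algorithm, no frequency table).

-- ===== PORT A =====
def create_longest_palindrome_length (n : String) : Int :=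
  let hash := n.toList.foldl (fun d i => d.insert i (d.getD i 0 + 1)) PySem.Dict.empty
  let length := hash.values.foldl (fun acc i => acc + PySem.Int.floordiv i 2 * 2) (0 : Int)
  if length < PySem.Str.len n then length + 1 else length

-- ===== PORT B =====
-- the while loop of Source B: walk the sorted list; on s[i] == s[i+1] take the pair (i += 2),
-- else advance by one (i += 1); structural recursion on the remaining suffix replaces the index i.
def pvPairScan : List Char → Int
  | a :: b :: rest => if a == b then pvPairScan rest + 2 else pvPairScan (b :: rest)
  | _ => 0

def create_longest_palindrome_length_alt (n : String) : Int :=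
  let s := PySem.List.sorted n.toList (fun x => x) false
  let length := pvPairScan s
  if length < PySem.Str.len n then length + 1 else length

-- ===== PRECONDITION & SPEC =====
def Spec_create_longest_palindrome_length (n : String) (out : Int) : Prop := out = create_longest_palindrome_length_alt n
instance (n : String) (out : Int) : Decidable (Spec_create_longest_palindrome_length n out) := by unfold Spec_create_longest_palindrome_length; infer_instance

-- ===== CLAIM (what is proved, stated in full; the proofs are below) =====
def Claim_equal_create_longest_palindrome_length : Prop := ∀ (n : String), Dom_create_longest_palindrome_length n → Spec_create_longest_palindrome_length n (create_longest_palindrome_length n)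

-- ===== LEMMAS AND PROOFS =====

-- pairing a run of m equal characters, followed by a suffix not containing that character,
-- yields m/2 pairs plus whatever the suffix yields.
theorem pvPairScan_replicate_append (a : Char) (xs : List Char) (ha : a ∉ xs) :
    ∀ m : Nat, pvPairScan (List.replicate m a ++ xs) = ((m / 2) * 2 : Nat) + pvPairScan xs := by
  intro m
  induction m using Nat.twoStepInduction with
  | zero => simp
  | one =>
    cases xs with
    | nil => simp [pvPairScan]
    | cons b t =>
      have hne : a ≠ b := fun h => ha (h ▸ List.mem_cons_self)
      simp [pvPairScan, hne]
  | more m ih _ =>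
    have : List.replicate (m + 2) a ++ xs = a :: a :: (List.replicate m a ++ xs) := by
      simp [List.replicate_succ]
    rw [this]
    simp only [pvPairScan, beq_self_eq_true, if_true, ih]
    have h2 : (m + 2) / 2 = m / 2 + 1 := by omega
    rw [h2]; push_cast; ring

theorem pv_sorted_decomp (a : Char) (t : List Char) (hs : (a :: t).Pairwise (· ≤ ·)) :
    a :: t = List.replicate ((a :: t).count a) a ++ (a :: t).filter (fun x => x ≠ a) := by
  have hmin : ∀ y ∈ a :: t, a ≤ y := by
    intro y hy
    rcases List.mem_cons.mp hy with h | h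
    · exact h ▸ le_refl a
    · exact List.rel_of_pairwise_cons hs h
  apply PySem.List.eq_of_perm_of_pairwise_le_of_injective (fun x => x) (fun _ _ h => h)
  · apply List.perm_iff_count.mpr
    intro x
    rw [List.count_append, List.count_replicate]
    by_cases hx : x = a
    · subst hx
      rw [List.count_eq_zero_of_not_mem (l := List.filter _ _) (by simp)]
      simp
    · rw [List.count_filter (by simp [hx])]
      simp [Ne.symm hx]
  · exact hs
  · apply List.pairwise_append.mpr
    refine ⟨List.pairwise_replicate.mpr (Or.inr (le_refl a)), hs.filter _, ?_⟩
    intro x hx y hy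
    rw [List.eq_of_mem_replicate hx]
    exact hmin y (List.mem_of_mem_filter hy)

theorem pvPairScan_sorted (s : List Char) (hs : s.Pairwise (· ≤ ·)) :
    pvPairScan s = ((PySem.List.dedup s).map (fun k => ((s.count k / 2) * 2 : Nat))).sum := by
  obtain ⟨N, hN⟩ : ∃ N, s.length ≤ N := ⟨s.length, le_refl _⟩
  induction N generalizing s with
  | zero =>
    have : s = [] := List.eq_nil_of_length_eq_zero (by omega)
    subst this; simp [pvPairScan]
  | succ N ih =>
    cases s with
    | nil => simp [pvPairScan]
    | cons a t =>
      set m := (a :: t).count a with hm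
      set f := (a :: t).filter (fun x => x ≠ a) with hf
      have hdecomp : a :: t = List.replicate m a ++ f := pv_sorted_decomp a t hs
      have haf : a ∉ f := by simp [hf]
      have hfs : f.Pairwise (· ≤ ·) := hs.filter _
      have hm1 : 1 ≤ m := List.count_pos_iff.mpr List.mem_cons_self
      have hlen : f.length ≤ N := by
        have := congrArg List.length hdecomp
        simp at this
        simp at hN
        omega
      have hps : pvPairScan (a :: t) = ((m / 2) * 2 : Nat) + pvPairScan f := by
        rw [hdecomp]; exact pvPairScan_replicate_append a f haf m
      rw [hps, ih f hfs hlen]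
      have hdd : (PySem.List.dedup (a :: t)).Perm (a :: PySem.List.dedup f) := by
        apply (List.perm_ext_iff_of_nodup (by simp)
          (List.nodup_cons.mpr ⟨by simpa [PySem.List.dedup_eq_ofList, PySem.Set.mem_ofList] using haf,
            by simp⟩)).mpr
        intro x
        simp only [PySem.List.dedup_eq_ofList, PySem.Set.mem_ofList, List.mem_cons]
        constructor
        · rintro (rfl | hx)
          · exact Or.inl rfl
          · by_cases hxa : x = a
            · exact Or.inl hxa
            · exact Or.inr (hf ▸ List.mem_filter.mpr
                ⟨List.mem_cons_of_mem a hx, by simpa using hxa⟩)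
        · rintro (rfl | hx)
          · exact Or.inl rfl
          · exact List.mem_cons.mp (List.mem_of_mem_filter (hf ▸ hx))
      have hcnt : ∀ k ∈ PySem.List.dedup f, (a :: t).count k = f.count k := by
        intro k hk
        have hkf : k ∈ f := by simpa [PySem.List.dedup_eq_ofList, PySem.Set.mem_ofList] using hk
        have hka : k ≠ a := fun h => haf (h ▸ hkf)
        rw [hdecomp, List.count_append, List.count_replicate, if_neg (by simpa using Ne.symm hka)]
        simp
      have hsum : ((PySem.List.dedup (a :: t)).map (fun k => (((a :: t).count k / 2) * 2 : Nat))).sum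
          = (m / 2) * 2 + ((PySem.List.dedup f).map (fun k => ((f.count k / 2) * 2 : Nat))).sum := by
        rw [List.Perm.sum_eq (hdd.map _), List.map_cons, List.sum_cons,
          List.map_congr_left (fun k hk => by rw [hcnt k hk])]
      rw [hsum]; push_cast; ring

theorem pv_sum_perm (s cs : List Char) (hp : s.Perm cs) :
    ((PySem.List.dedup s).map (fun k => ((s.count k / 2) * 2 : Nat))).sum
      = ((PySem.Set.ofList cs).map (fun k => ((cs.count k / 2) * 2 : Nat))).sum := by
  have hdd : (PySem.List.dedup s).Perm (PySem.Set.ofList cs) := by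
    apply (List.perm_ext_iff_of_nodup (by simp)
      (PySem.Set.nodup_ofList cs)).mpr
    intro x
    simp only [PySem.List.dedup_eq_ofList, PySem.Set.mem_ofList]
    exact ⟨fun h => hp.mem_iff.mp h, fun h => hp.mem_iff.mpr h⟩
  calc ((PySem.List.dedup s).map (fun k => ((s.count k / 2) * 2 : Nat))).sum
      = ((PySem.List.dedup s).map (fun k => ((cs.count k / 2) * 2 : Nat))).sum := by
        rw [List.map_congr_left (fun k _ => by rw [hp.count_eq])]
    _ = _ := List.Perm.sum_eq (hdd.map _)

-- ===== VERDICT (by name: the statement is the Claim_ definition above) =====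
theorem create_longest_palindrome_length_spec : Claim_equal_create_longest_palindrome_length := by
  intro n _
  unfold Spec_create_longest_palindrome_length create_longest_palindrome_length create_longest_palindrome_length_alt
  dsimp only
  rw [PySem.Dict.foldl_insert_getD_add_one_eq_counter]
  have hv : (PySem.Dict.counter n.toList).values
      = (PySem.Set.ofList n.toList).map (fun k => (n.toList.count k : Int)) := by
    simp only [PySem.Dict.values, PySem.Dict.items_counter, List.map_map]; rfl
  rw [hv, List.foldl_map, PySem.List.foldl_add]
  rw [pvPairScan_sorted _ (PySem.List.sorted_pairwise n.toList (fun x => x)),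
      pv_sum_perm _ _ (PySem.List.sorted_perm n.toList (fun x => x) false)]
  have : ((PySem.Set.ofList n.toList).map
        (fun k => PySem.Int.floordiv ((n.toList.count k : Nat) : Int) 2 * 2)).sum
      = (((PySem.Set.ofList n.toList).map (fun k => ((n.toList.count k / 2) * 2 : Nat))).sum : Int) := by
    rw [Nat.cast_list_sum, List.map_map]
    apply congrArg
    apply List.map_congr_left
    intro k _
    rw [PySem.Int.floordiv_eq_ediv_of_pos (by omega)]
    simp only [Function.comp]
    push_cast
    omega
  rw [this]
  simp only [zero_add]
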